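-- pv_equiv track=rewrite | github.com/yueguobin/gns3-server | scripts/show_model_context_limits.py | find_context_limit_for_model
-- ===== SOURCE A (Python) =====
-- MODEL_CONTEXT_LIMITS_K = {
--     # OpenAI Models
--     "gpt-4o": 128,
--     "gpt-4o-mini": 128,
--     "gpt-4-turbo": 128,
--     "gpt-4": 8,
--     "gpt-4-32k": 33,
--     "gpt-3.5-turbo": 17,
--     "gpt-3.5-turbo-16k": 17,
--
--     # Anthropic Models
--     "claude-3-5-sonnet-20241022": 200,
--     "claude-3-5-sonnet-20240620": 200,
--     "claude-3-opus-20240229": 200,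
--     "claude-3-sonnet-20240229": 200,
--     "claude-3-haiku-20240307": 200,
--
--     # Google Models
--     "gemini-2.0-flash-exp": 1000,
--     "gemini-1.5-pro": 2800,
--     "gemini-1.5-flash": 2800,
--     "gemini-pro": 92,
--
--     # DeepSeek Models
--     "deepseek-chat": 128,
--     "deepseek-coder": 128,
--
--     # xAI Models
--     "grok-beta": 128,
-- }
--
-- def find_context_limit_for_model(model_name: str) -> int | None:
--     """Find the context limit for a given model name (in K tokens)."""
--     model_lower = model_name.lower().strip()
--
--     # Try exact match
--     if model_lower in MODEL_CONTEXT_LIMITS_K: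
--         return MODEL_CONTEXT_LIMITS_K[model_lower]
--
--     # Try prefix match
--     for key, limit in MODEL_CONTEXT_LIMITS_K.items():
--         if model_lower.startswith(key.lower()):
--             return limit
--
--     return None
-- ===== SOURCE B (Python) =====
-- MODEL_CONTEXT_LIMITS_K = {
--     "gpt-4o": 128,
--     "gpt-4o-mini": 128,
--     "gpt-4-turbo": 128,
--     "gpt-4": 8,
--     "gpt-4-32k": 33,
--     "gpt-3.5-turbo": 17,
--     "gpt-3.5-turbo-16k": 17,
--     "claude-3-5-sonnet-20241022": 200,
--     "claude-3-5-sonnet-20240620": 200,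
--     "claude-3-opus-20240229": 200,
--     "claude-3-sonnet-20240229": 200,
--     "claude-3-haiku-20240307": 200,
--     "gemini-2.0-flash-exp": 1000,
--     "gemini-1.5-pro": 2800,
--     "gemini-1.5-flash": 2800,
--     "gemini-pro": 92,
--     "deepseek-chat": 128,
--     "deepseek-coder": 128,
--     "grok-beta": 128,
-- }
--
-- _MAX_KEY_LEN = max(len(k) for k in MODEL_CONTEXT_LIMITS_K)
--
--
-- def find_context_limit_for_model(model_name: str) -> int | None:
--     """Longest-prefix match: try the longest useful prefix of the normalized name,
--     then ever shorter ones, as dict keys.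
--
--     An exact key is the longest possible prefix, so exact matches win automatically;
--     prefixes longer than every key cannot match, so the loop starts at _MAX_KEY_LEN.
--     """
--     s = model_name.lower().strip()
--     for i in range(min(len(s), _MAX_KEY_LEN), 0, -1):
--         hit = MODEL_CONTEXT_LIMITS_K.get(s[:i])
--         if hit is not None:
--             return hit
--     return None
-- ===== Notes on version B (the rewrite author's own statement) =====
-- stated objective: alternative
-- what changed: Instead of scanning the table (membership test, then a first-match prefix loop over items), B iterates over prefixes of the normalized name from the longest useful length (capped by the maximum key length) down to 1 and returns the first one that is a dict key - longest-prefix match via dict lookups; an exact key is the longest possible prefix, so exact-match priority comes for free.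
-- intended difference: On names whose normalized form strictly extends "gpt-4-32k" (e.g. "gpt-4-32k-0613"), A returns 8 because the earlier "gpt-4" entry wins its first-match scan, while B returns 33, the intended limit for a gpt-4-32k variant. — e.g. on find_context_limit_for_model("gpt-4-32k-0613"): A returns some 8, B returns some 33
import Mathlib
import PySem

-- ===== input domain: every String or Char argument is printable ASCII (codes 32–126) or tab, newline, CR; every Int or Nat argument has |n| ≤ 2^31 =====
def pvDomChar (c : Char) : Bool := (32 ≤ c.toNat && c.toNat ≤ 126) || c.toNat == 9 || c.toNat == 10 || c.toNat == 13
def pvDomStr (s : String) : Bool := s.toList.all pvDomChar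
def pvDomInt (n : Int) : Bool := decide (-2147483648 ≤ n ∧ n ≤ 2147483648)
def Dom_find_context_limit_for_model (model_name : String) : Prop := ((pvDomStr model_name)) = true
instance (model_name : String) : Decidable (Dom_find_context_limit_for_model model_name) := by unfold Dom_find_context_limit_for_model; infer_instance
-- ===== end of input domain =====

-- B replaces A's dict-membership test plus first-match prefix scan over the table by a
-- longest-prefix lookup: it tries ever shorter prefixes of the normalized name as dict keys
-- (an exact key is the longest possible prefix, so exact matches win automatically).
-- Intended difference (D_): on names strictly extending "gpt-4-32k" A returns 8 (the earlier
-- "gpt-4" entry wins its first-match scan), B returns the intended 33.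


-- ===== PORT A =====
-- the module-level dict, in insertion order
def MODEL_CONTEXT_LIMITS_K : List (String × Int) :=
  [("gpt-4o", 128), ("gpt-4o-mini", 128), ("gpt-4-turbo", 128), ("gpt-4", 8),
   ("gpt-4-32k", 33), ("gpt-3.5-turbo", 17), ("gpt-3.5-turbo-16k", 17),
   ("claude-3-5-sonnet-20241022", 200), ("claude-3-5-sonnet-20240620", 200),
   ("claude-3-opus-20240229", 200), ("claude-3-sonnet-20240229", 200),
   ("claude-3-haiku-20240307", 200), ("gemini-2.0-flash-exp", 1000),
   ("gemini-1.5-pro", 2800), ("gemini-1.5-flash", 2800), ("gemini-pro", 92),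
   ("deepseek-chat", 128), ("deepseek-coder", 128), ("grok-beta", 128)]

-- dict lookup, first matching key: A's 'x in d' + 'd[x]', B's 'd.get(x)'
def pvDictGet (x : String) : List (String × Int) → Option Int
  | [] => none
  | (k, v) :: rest => if k == x then some v else pvDictGet x rest

-- A's prefix-match loop over dict.items()
def pvPrefixScan (ml : String) : List (String × Int) → Option Int
  | [] => none
  | (k, v) :: rest =>
      if PySem.Str.startswith ml (PySem.Str.lower k) then some v else pvPrefixScan ml rest

def find_context_limit_for_model (model_name : String) : Option Int :=
  let model_lower := PySem.Str.strip (PySem.Str.lower model_name)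
  match pvDictGet model_lower MODEL_CONTEXT_LIMITS_K with
  | some v => some v
  | none => pvPrefixScan model_lower MODEL_CONTEXT_LIMITS_K

-- ===== PORT B =====
-- B's loop 'for i in range(len(s), 0, -1)': look s[:i] up, return the first hit
def pvDescLoop (s : String) : List Int → Option Int
  | [] => none
  | i :: rest =>
      match pvDictGet (PySem.Str.slice s none (some i)) MODEL_CONTEXT_LIMITS_K with
      | some v => some v
      | none => pvDescLoop s rest

-- _MAX_KEY_LEN = max(len(k) for k in MODEL_CONTEXT_LIMITS_K); the dict literal is
-- nonempty so Python's max() cannot raise — '.getD 0' is that impossible branch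
def pvMaxKeyLen : Int :=
  (PySem.List.max? (MODEL_CONTEXT_LIMITS_K.map (fun p => PySem.Str.len p.1)) id).getD 0

def find_context_limit_for_model_alt (model_name : String) : Option Int :=
  let s := PySem.Str.strip (PySem.Str.lower model_name)
  pvDescLoop s (PySem.List.pyRange (min (PySem.Str.len s) pvMaxKeyLen) 0 (-1))

-- ===== PRECONDITION & SPEC =====
-- On names whose normalized form strictly extends "gpt-4-32k", A's first-match scan hits the
-- earlier "gpt-4" entry and returns 8, while B's longest-prefix match returns the intended 33.
def D_find_context_limit_for_model (model_name : String) : Prop :=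
  let t := PySem.Str.strip (PySem.Str.lower model_name)
  PySem.Str.startswith t "gpt-4-32k" = true ∧ t ≠ "gpt-4-32k"
instance (model_name : String) : Decidable (D_find_context_limit_for_model model_name) := by unfold D_find_context_limit_for_model; infer_instance

def Spec_find_context_limit_for_model (model_name : String) (out : Option Int) : Prop := ¬ D_find_context_limit_for_model model_name → out = find_context_limit_for_model_alt model_name
instance (model_name : String) (out : Option Int) : Decidable (Spec_find_context_limit_for_model model_name out) := by unfold Spec_find_context_limit_for_model; infer_instance

def pvDiffWitness_find_context_limit_for_model : String := "gpt-4-32k-0613"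
def pvDiffWitnessOut_find_context_limit_for_model : (Option Int) × (Option Int) := (some 8, some 33)

-- ===== CLAIM (what is proved, stated in full; the proofs are below) =====
def Claim_unchanged_find_context_limit_for_model : Prop := ∀ (model_name : String), Dom_find_context_limit_for_model model_name → Spec_find_context_limit_for_model model_name (find_context_limit_for_model model_name)
def Claim_changed_find_context_limit_for_model : Prop := Dom_find_context_limit_for_model (pvDiffWitness_find_context_limit_for_model) ∧ D_find_context_limit_for_model (pvDiffWitness_find_context_limit_for_model) ∧ find_context_limit_for_model (pvDiffWitness_find_context_limit_for_model) = pvDiffWitnessOut_find_context_limit_for_model.1 ∧ find_context_limit_for_model_alt (pvDiffWitness_find_context_limit_for_model) = pvDiffWitnessOut_find_context_limit_for_model.2 ∧ pvDiffWitnessOut_find_context_limit_for_model.1 ≠ pvDiffWitnessOut_find_context_limit_for_model.2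
def Claim_exact_find_context_limit_for_model : Prop := ∀ (model_name : String), Dom_find_context_limit_for_model model_name → D_find_context_limit_for_model model_name → find_context_limit_for_model model_name ≠ find_context_limit_for_model_alt model_name

-- ===== LEMMAS AND PROOFS =====

-- ---- concrete facts about the table (proved by computation) ----
set_option maxHeartbeats 4000000 in
theorem pvKeysLower : ∀ p ∈ MODEL_CONTEXT_LIMITS_K, PySem.Str.lower p.1 = p.1 := by decide

set_option maxHeartbeats 4000000 in
theorem pvSelfGet : ∀ p ∈ MODEL_CONTEXT_LIMITS_K, pvDictGet p.1 MODEL_CONTEXT_LIMITS_K = some p.2 := by decide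

set_option maxHeartbeats 4000000 in
theorem pvKeysNonempty : ∀ p ∈ MODEL_CONTEXT_LIMITS_K, 1 ≤ p.1.toList.length := by decide

set_option maxHeartbeats 4000000 in
theorem pvMaxKeyLen_eq : pvMaxKeyLen = 26 := by decide

set_option maxHeartbeats 4000000 in
theorem pvKeysLen26 : ∀ p ∈ MODEL_CONTEXT_LIMITS_K, p.1.toList.length ≤ 26 := by decide

-- no key other than "gpt-4-32k" itself begins with "gpt-4-32k"
set_option maxHeartbeats 4000000 in
theorem pvTake9 : ∀ p ∈ MODEL_CONTEXT_LIMITS_K,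
    p.1.toList.take 9 = "gpt-4-32k".toList → p.1.toList.length ≤ 9 := by decide

-- ---- generic facts about the loops ----
theorem pvDictGet_none (x : String) (lst : List (String × Int))
    (h : ∀ p ∈ lst, p.1 ≠ x) : pvDictGet x lst = none := by
  induction lst with
  | nil => rfl
  | cons p rest ih =>
      obtain ⟨k, v⟩ := p
      have hk : k ≠ x := h (k, v) (List.mem_cons_self ..)
      simp only [pvDictGet, beq_iff_eq, if_neg hk]
      exact ih fun q hq => h q (List.mem_cons_of_mem _ hq)

theorem pvDictGet_mem (x : String) (v : Int) (lst : List (String × Int))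
    (h : pvDictGet x lst = some v) : (x, v) ∈ lst := by
  induction lst with
  | nil => simp [pvDictGet] at h
  | cons p rest ih =>
      obtain ⟨k, w⟩ := p
      simp only [pvDictGet] at h
      by_cases hk : k = x
      · subst hk
        simp at h
        subst h
        exact List.mem_cons_self ..
      · simp [hk] at h
        exact List.mem_cons_of_mem _ (ih h)

-- first entry whose key is a prefix of k (a fully concrete function of k on the table)
def pvFirstSub (k : String) : List (String × Int) → Option Int
  | [] => none
  | (j, v) :: rest => if j.toList.isPrefixOf k.toList then some v else pvFirstSub k rest

theorem pvPrefixScan_congr (ml k : String) (lst : List (String × Int))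
    (h : ∀ p ∈ lst, PySem.Str.startswith ml (PySem.Str.lower p.1) = p.1.toList.isPrefixOf k.toList) :
    pvPrefixScan ml lst = pvFirstSub k lst := by
  induction lst with
  | nil => rfl
  | cons p rest ih =>
      obtain ⟨j, v⟩ := p
      have hj := h (j, v) (List.mem_cons_self ..)
      simp only [pvPrefixScan, pvFirstSub, hj]
      split_ifs with hc
      · rfl
      · exact ih fun q hq => h q (List.mem_cons_of_mem _ hq)

theorem pvDescLoop_none (s : String) (is : List Int)
    (h : ∀ i ∈ is, pvDictGet (PySem.Str.slice s none (some i)) MODEL_CONTEXT_LIMITS_K = none) :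
    pvDescLoop s is = none := by
  induction is with
  | nil => rfl
  | cons i rest ih =>
      simp only [pvDescLoop, h i (List.mem_cons_self ..)]
      exact ih fun j hj => h j (List.mem_cons_of_mem _ hj)

theorem pvDescLoop_find (s : String) (ℓ : Nat) (v : Int) (j : Nat)
    (h1 : 1 ≤ ℓ)
    (hhit : pvDictGet (PySem.Str.slice s none (some (ℓ : Int))) MODEL_CONTEXT_LIMITS_K = some v)
    (hnone : ∀ i : Int, (ℓ : Int) < i → i ≤ (ℓ : Int) + j →
      pvDictGet (PySem.Str.slice s none (some i)) MODEL_CONTEXT_LIMITS_K = none) :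
    pvDescLoop s (PySem.List.pyRange ((ℓ : Int) + j) 0 (-1)) = some v := by
  induction j with
  | zero =>
      rw [show ((ℓ : Int) + ((0 : Nat) : Int)) = (ℓ : Int) by push_cast; ring]
      rw [PySem.List.pyRange_neg_one_cons (by exact_mod_cast h1)]
      simp only [pvDescLoop, hhit]
  | succ m ih =>
      have htop : (0 : Int) < (ℓ : Int) + ((m + 1 : Nat) : Int) := by push_cast; omega
      rw [PySem.List.pyRange_neg_one_cons htop]
      have hn : pvDictGet (PySem.Str.slice s none (some ((ℓ : Int) + ((m + 1 : Nat) : Int)))) MODEL_CONTEXT_LIMITS_K = none := by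
        apply hnone <;> push_cast <;> omega
      simp only [pvDescLoop, hn]
      rw [show ((ℓ : Int) + ((m + 1 : Nat) : Int) - 1) = ((ℓ : Int) + ((m : Nat) : Int)) by push_cast; ring]
      exact ih fun i hi1 hi2 => hnone i hi1 (by push_cast at hi2 ⊢; omega)

-- ---- string facts ----
theorem pvSlice_toList (t : String) (i : Int) (h : 0 ≤ i) :
    (PySem.Str.slice t none (some i)).toList = t.toList.take i.toNat := by
  rw [PySem.Str.toList_slice]
  exact PySem.List.slice_to _ h

theorem pvSW_prefix (t k : String) (h : PySem.Str.startswith t k = true) :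
    k.toList <+: t.toList := by
  rw [PySem.Str.startswith_eq] at h
  exact (PySem.Chars.startswith_iff _ _).mp h

theorem pvSW_of_prefix (t : String) (cs : List Char) (h : cs <+: t.toList) (k : String)
    (hk : k.toList = cs) : PySem.Str.startswith t k = true := by
  rw [PySem.Str.startswith_eq, PySem.Chars.startswith_iff, hk]
  exact h

theorem pvSliceKey (t k : String) (h : PySem.Str.startswith t k = true) :
    PySem.Str.slice t none (some (k.toList.length : Int)) = k := by
  apply String.toList_inj.mp
  rw [pvSlice_toList t _ (by positivity)]
  have := pvSW_prefix t k h
  simpa using (List.prefix_iff_eq_take.mp this).symm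

-- ---- the maximal key-prefix of t, and its properties ----
def pvBest (t : String) : List (String × Int) → Option (String × Int)
  | [] => none
  | p :: rest =>
      match pvBest t rest with
      | none => if PySem.Str.startswith t p.1 then some p else none
      | some q => if PySem.Str.startswith t p.1 && decide (q.1.toList.length < p.1.toList.length)
                  then some p else some q

theorem pvBest_none (t : String) (lst : List (String × Int)) (h : pvBest t lst = none) :
    ∀ p ∈ lst, PySem.Str.startswith t p.1 = false := by
  induction lst with
  | nil => intro p hp; simp at hp
  | cons p rest ih =>
      simp only [pvBest] at h
      rcases hr : pvBest t rest with _ | b <;> rw [hr] at h <;> dsimp only at h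
      · intro q hq
        rcases List.mem_cons.mp hq with rfl | hq'
        · by_contra hc
          rw [Bool.not_eq_false] at hc
          rw [if_pos hc] at h
          simp at h
        · exact ih hr q hq'
      · split_ifs at h

theorem pvBest_some (t : String) (lst : List (String × Int)) (k : String) (v : Int)
    (h : pvBest t lst = some (k, v)) :
    (k, v) ∈ lst ∧ PySem.Str.startswith t k = true ∧
      ∀ p ∈ lst, PySem.Str.startswith t p.1 = true → p.1.toList.length ≤ k.toList.length := by
  induction lst generalizing k v with
  | nil => simp [pvBest] at h
  | cons p rest ih =>
      simp only [pvBest] at h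
      rcases hr : pvBest t rest with _ | b <;> rw [hr] at h <;> dsimp only at h
      · split_ifs at h with hc
        · injection h with h'
          subst h'
          refine ⟨List.mem_cons_self .., hc, ?_⟩
          intro q hq hsw
          rcases List.mem_cons.mp hq with rfl | hq'
          · exact le_rfl
          · rw [pvBest_none t rest hr q hq'] at hsw
            exact Bool.noConfusion hsw
      · obtain ⟨b1, b2⟩ := b
        obtain ⟨hbm, hbsw, hbmax⟩ := ih b1 b2 hr
        split_ifs at h with hc
        · simp only [Bool.and_eq_true, decide_eq_true_eq] at hc
          injection h with h'
          subst h'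
          dsimp only at hc
          refine ⟨List.mem_cons_self .., hc.1, ?_⟩
          intro q hq hsw
          rcases List.mem_cons.mp hq with rfl | hq'
          · exact le_rfl
          · have := hbmax q hq' hsw
            omega
        · injection h with h'
          rw [Prod.mk.injEq] at h'
          obtain ⟨rfl, rfl⟩ := h'
          simp only [Bool.and_eq_true, decide_eq_true_eq, not_and] at hc
          refine ⟨List.mem_cons_of_mem _ hbm, hbsw, ?_⟩
          intro q hq hsw
          rcases List.mem_cons.mp hq with rfl | hq'
          · have := hc hsw
            omega
          · exact hbmax q hq' hsw

-- ---- core bridge lemmas (t arbitrary, k its maximal key-prefix) ----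
theorem pvA_exact_none (t k : String)
    (hsw : PySem.Str.startswith t k = true)
    (hmax : ∀ p ∈ MODEL_CONTEXT_LIMITS_K, PySem.Str.startswith t p.1 = true →
      p.1.toList.length ≤ k.toList.length)
    (hne : t ≠ k) : pvDictGet t MODEL_CONTEXT_LIMITS_K = none := by
  apply pvDictGet_none
  intro p hp hpt
  have hswp : PySem.Str.startswith t p.1 = true :=
    pvSW_of_prefix t t.toList (List.prefix_refl _) p.1 (by rw [hpt])
  have hlen1 : p.1.toList.length ≤ k.toList.length := hmax p hp hswp
  have hkpre : k.toList <+: t.toList := pvSW_prefix t k hsw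
  have : k.toList = t.toList := hkpre.eq_of_length_le (by rw [← hpt]; exact hlen1)
  exact hne (String.toList_inj.mp this.symm) |>.elim

theorem pvA_scan (t k : String)
    (hsw : PySem.Str.startswith t k = true)
    (hmax : ∀ p ∈ MODEL_CONTEXT_LIMITS_K, PySem.Str.startswith t p.1 = true →
      p.1.toList.length ≤ k.toList.length) :
    pvPrefixScan t MODEL_CONTEXT_LIMITS_K = pvFirstSub k MODEL_CONTEXT_LIMITS_K := by
  apply pvPrefixScan_congr
  intro p hp
  rw [pvKeysLower p hp]
  have hkpre : k.toList <+: t.toList := pvSW_prefix t k hsw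
  cases hb : PySem.Str.startswith t p.1 with
  | true =>
      have hppre : p.1.toList <+: t.toList := pvSW_prefix t p.1 hb
      have hpk : p.1.toList <+: k.toList :=
        List.prefix_of_prefix_length_le hppre hkpre (hmax p hp hb)
      exact (List.isPrefixOf_iff_prefix.mpr hpk).symm
  | false =>
      by_contra hc
      have hpk : p.1.toList.isPrefixOf k.toList = true := by
        cases hx : p.1.toList.isPrefixOf k.toList
        · rw [hx] at hc; exact (hc rfl).elim
        · rfl
      have hppre : p.1.toList <+: t.toList :=
        (List.isPrefixOf_iff_prefix.mp hpk).trans hkpre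
      rw [pvSW_of_prefix t p.1.toList hppre p.1 rfl] at hb
      exact Bool.noConfusion hb

theorem pvB_some (t k : String) (v : Int)
    (hm : (k, v) ∈ MODEL_CONTEXT_LIMITS_K)
    (hsw : PySem.Str.startswith t k = true)
    (hmax : ∀ p ∈ MODEL_CONTEXT_LIMITS_K, PySem.Str.startswith t p.1 = true →
      p.1.toList.length ≤ k.toList.length) :
    pvDescLoop t (PySem.List.pyRange (min (PySem.Str.len t) pvMaxKeyLen) 0 (-1)) = some v := by
  have hℓ1 : 1 ≤ k.toList.length := pvKeysNonempty (k, v) hm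
  have hℓn : k.toList.length ≤ t.toList.length := (pvSW_prefix t k hsw).length_le
  have hℓ26 : k.toList.length ≤ 26 := pvKeysLen26 (k, v) hm
  have hlen : min (PySem.Str.len t) pvMaxKeyLen =
      (k.toList.length : Int) + ((min t.toList.length 26 - k.toList.length : Nat) : Int) := by
    rw [pvMaxKeyLen_eq]
    simp only [PySem.Str.len_eq]
    omega
  rw [hlen]
  apply pvDescLoop_find t k.toList.length v _ hℓ1
  · rw [pvSliceKey t k hsw]
    exact pvSelfGet (k, v) hm
  · intro i hi1 hi2
    have h0i : 0 ≤ i := by omega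
    cases hgi : pvDictGet (PySem.Str.slice t none (some i)) MODEL_CONTEXT_LIMITS_K with
    | none => rfl
    | some w =>
        exfalso
        have hmem := pvDictGet_mem _ w _ hgi
        have hx : (PySem.Str.slice t none (some i)).toList = t.toList.take i.toNat :=
          pvSlice_toList t i h0i
        have hswx : PySem.Str.startswith t (PySem.Str.slice t none (some i)) = true :=
          pvSW_of_prefix t (t.toList.take i.toNat) (List.take_prefix ..) _ hx
        have hlenx := hmax _ hmem hswx
        have hin : i.toNat ≤ t.toList.length := by omega
        rw [hx, List.length_take] at hlenx
        omega

theorem pvB_none (t : String)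
    (hno : ∀ p ∈ MODEL_CONTEXT_LIMITS_K, PySem.Str.startswith t p.1 = false) :
    pvDescLoop t (PySem.List.pyRange (min (PySem.Str.len t) pvMaxKeyLen) 0 (-1)) = none := by
  apply pvDescLoop_none
  intro i hi
  obtain ⟨hi0, _⟩ := PySem.List.mem_pyRange_neg_one.mp hi
  cases hgi : pvDictGet (PySem.Str.slice t none (some i)) MODEL_CONTEXT_LIMITS_K with
  | none => rfl
  | some w =>
      exfalso
      have hmem := pvDictGet_mem _ w _ hgi
      have hx : (PySem.Str.slice t none (some i)).toList = t.toList.take i.toNat :=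
        pvSlice_toList t i (by omega)
      have hswx : PySem.Str.startswith t (PySem.Str.slice t none (some i)) = true :=
        pvSW_of_prefix t (t.toList.take i.toNat) (List.take_prefix ..) _ hx
      rw [hno _ hmem] at hswx
      exact Bool.noConfusion hswx

-- ---- the main argument, stated on the normalized string t ----
set_option maxHeartbeats 4000000 in
theorem pvMain (t : String)
    (hnd : ¬(PySem.Str.startswith t "gpt-4-32k" = true ∧ t ≠ "gpt-4-32k")) :
    (match pvDictGet t MODEL_CONTEXT_LIMITS_K with
     | some v => some v
     | none => pvPrefixScan t MODEL_CONTEXT_LIMITS_K) =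
      pvDescLoop t (PySem.List.pyRange (min (PySem.Str.len t) pvMaxKeyLen) 0 (-1)) := by
  rcases hb : pvBest t MODEL_CONTEXT_LIMITS_K with _ | ⟨k, v⟩
  · have hno := pvBest_none t _ hb
    have hexact : pvDictGet t MODEL_CONTEXT_LIMITS_K = none := by
      apply pvDictGet_none
      intro p hp hpt
      have hswp : PySem.Str.startswith t p.1 = true :=
        pvSW_of_prefix t t.toList (List.prefix_refl _) p.1 (by rw [hpt])
      rw [hno p hp] at hswp
      exact Bool.noConfusion hswp
    rw [hexact, pvB_none t hno]
    show pvPrefixScan t MODEL_CONTEXT_LIMITS_K = none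
    rw [pvPrefixScan_congr t "" _ ?_]
    · rfl
    · intro p hp
      rw [pvKeysLower p hp, hno p hp]
      have h1 := pvKeysNonempty p hp
      cases hpl : p.1.toList with
      | nil => rw [hpl] at h1; simp at h1
      | cons c cs => rfl
  · obtain ⟨hm, hsw, hmax⟩ := pvBest_some t _ k v hb
    by_cases ht : t = k
    · subst ht
      rw [show pvDictGet t MODEL_CONTEXT_LIMITS_K = some v from pvSelfGet (t, v) hm]
      rw [pvB_some t t v hm hsw hmax]
    · rw [pvA_exact_none t k hsw hmax ht]
      show pvPrefixScan t MODEL_CONTEXT_LIMITS_K = _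
      rw [pvA_scan t k hsw hmax, pvB_some t k v hm hsw hmax]
      fin_cases hm <;>
        first
          | decide
          | exact absurd ⟨hsw, ht⟩ hnd

-- tight version of the same argument inside D_
set_option maxHeartbeats 4000000 in
theorem pvTight (t : String)
    (hsw : PySem.Str.startswith t "gpt-4-32k" = true) (hne : t ≠ "gpt-4-32k") :
    (match pvDictGet t MODEL_CONTEXT_LIMITS_K with
     | some v => some v
     | none => pvPrefixScan t MODEL_CONTEXT_LIMITS_K) ≠
      pvDescLoop t (PySem.List.pyRange (min (PySem.Str.len t) pvMaxKeyLen) 0 (-1)) := by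
  have hmax : ∀ p ∈ MODEL_CONTEXT_LIMITS_K, PySem.Str.startswith t p.1 = true →
      p.1.toList.length ≤ ("gpt-4-32k" : String).toList.length := by
    intro p hp hswp
    by_contra hlen
    rw [not_le] at hlen
    have hppre : p.1.toList <+: t.toList := pvSW_prefix t p.1 hswp
    have hkpre : ("gpt-4-32k" : String).toList <+: t.toList := pvSW_prefix t _ hsw
    have hkp : ("gpt-4-32k" : String).toList <+: p.1.toList :=
      List.prefix_of_prefix_length_le hkpre hppre (by omega)
    have h9 : ("gpt-4-32k" : String).toList.length = 9 := by decide
    have htake : p.1.toList.take 9 = "gpt-4-32k".toList := by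
      have h' := List.prefix_iff_eq_take.mp hkp
      rw [h9] at h'
      exact h'.symm
    have hle := pvTake9 p hp htake
    rw [h9] at hlen
    omega
  have hm : (("gpt-4-32k" : String), (33 : Int)) ∈ MODEL_CONTEXT_LIMITS_K := by decide
  rw [pvA_exact_none t _ hsw hmax hne]
  show pvPrefixScan t MODEL_CONTEXT_LIMITS_K ≠ _
  rw [pvA_scan t _ hsw hmax, pvB_some t _ 33 hm hsw hmax]
  decide

-- ===== VERDICT (by name: the statements are the Claim_ definitions above) =====
set_option maxHeartbeats 4000000 in
theorem find_context_limit_for_model_spec : Claim_unchanged_find_context_limit_for_model := by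
  intro s _
  unfold Spec_find_context_limit_for_model
  intro hnd
  unfold D_find_context_limit_for_model at hnd
  exact pvMain (PySem.Str.strip (PySem.Str.lower s)) hnd

set_option maxHeartbeats 4000000 in
theorem find_context_limit_for_model_changed : Claim_changed_find_context_limit_for_model := by
  unfold Claim_changed_find_context_limit_for_model; decide

set_option maxHeartbeats 4000000 in
theorem find_context_limit_for_model_tight : Claim_exact_find_context_limit_for_model := by
  intro s _ hd
  unfold D_find_context_limit_for_model at hd
  exact pvTight (PySem.Str.strip (PySem.Str.lower s)) hd.1 hd.2
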